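-- pv_equiv track=rewrite | github.com/ChemData/hexmap | encounter_generation/mob_sets.py | provide_link
-- ===== SOURCE A (Python) =====
-- def provide_link(text):
--     conditions = [
--         "blinded", "charmed", "deafened", "frightened", "grappled", "incapacitated", "invisible", "paralyzed",
--         "petrified", "poisoned", "prone", "restrained", "stunned", "unconscious", "exhaustion"]
--     condition_url = "https://roll20.net/compendium/dnd5e/Conditions#content"
--     for condition in conditions:
--         text = text.replace(condition, f"[[{condition_url}|{condition}]]", 1)
--     return text
-- ===== SOURCE B (Python) =====
-- def provide_link(text):
--     conditions = [
--         "blinded", "charmed", "deafened", "frightened", "grappled", "incapacitated", "invisible", "paralyzed",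
--         "petrified", "poisoned", "prone", "restrained", "stunned", "unconscious", "exhaustion"]
--     condition_url = "https://roll20.net/compendium/dnd5e/Conditions#content"
--     out = []
--     seen = set()
--     i = 0
--     n = len(text)
--     while i < n:
--         for condition in conditions:
--             if condition not in seen and text.startswith(condition, i):
--                 out.append(f"[[{condition_url}|{condition}]]")
--                 seen.add(condition)
--                 i += len(condition)
--                 break
--         else:
--             out.append(text[i])
--             i += 1
--     return "".join(out)
-- ===== Notes on version B (the rewrite author's own statement) =====
-- stated objective: alternative
-- what changed: Replaces A's 15 sequential full-string str.replace(...,1) passes (each rebuilding the string) by a single left-to-right scan over the text with a seen-set that wraps the first occurrence of each condition in one pass.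
import Mathlib
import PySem

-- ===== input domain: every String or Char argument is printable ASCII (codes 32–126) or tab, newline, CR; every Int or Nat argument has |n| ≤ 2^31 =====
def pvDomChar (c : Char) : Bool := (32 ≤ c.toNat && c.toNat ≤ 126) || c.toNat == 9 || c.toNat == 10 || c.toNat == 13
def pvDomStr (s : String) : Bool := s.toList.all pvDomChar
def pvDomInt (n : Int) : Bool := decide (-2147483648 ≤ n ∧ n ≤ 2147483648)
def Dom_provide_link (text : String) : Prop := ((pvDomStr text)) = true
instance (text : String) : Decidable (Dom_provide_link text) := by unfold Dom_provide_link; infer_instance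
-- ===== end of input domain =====

-- B replaces A's 15 sequential str.replace(...,1) passes by a single left-to-right scan with a
-- seen-set (objective: alternative, one pass instead of 15).

-- ===== PORT A =====
def pvConds : List (List Char) :=
  ["blinded".toList, "charmed".toList, "deafened".toList, "frightened".toList, "grappled".toList,
   "incapacitated".toList, "invisible".toList, "paralyzed".toList, "petrified".toList,
   "poisoned".toList, "prone".toList, "restrained".toList, "stunned".toList,
   "unconscious".toList, "exhaustion".toList]

def pvUrl : List Char := "https://roll20.net/compendium/dnd5e/Conditions#content".toList

-- f"[[{condition_url}|{condition}]]"
def pvWrap (c : List Char) : List Char := "[[".toList ++ pvUrl ++ "|".toList ++ c ++ "]]".toList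

-- index of the first occurrence of c in u (str.find, the search str.replace performs)
def pvFind (c : List Char) (u : List Char) : Option Nat :=
  match u with
  | [] => if c.isEmpty then some 0 else none
  | x :: xs => if c.isPrefixOf (x :: xs) then some 0 else (pvFind c xs).map (· + 1)

-- exact port of t.replace(c, rep, 1): splice rep in at the first occurrence of c, unchanged if absent
def pvReplace1 (t c rep : List Char) : List Char :=
  match pvFind c t with
  | none => t
  | some i => t.take i ++ rep ++ t.drop (i + c.length)

def pvStep (t c : List Char) : List Char := pvReplace1 t c (pvWrap c)

def provide_link (text : String) : String :=
  String.ofList (pvConds.foldl pvStep text.toList)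

-- ===== PORT B =====
-- cited by pvScanB's decreasing_by (termination only)
theorem pvConds_length_pos : ∀ c ∈ pvConds, 0 < c.length := by decide

-- the while-loop of B: at each position wrap the first not-yet-seen condition that starts here
def pvScanB (u : List Char) (seen : PySem.Set (List Char)) : List Char :=
  match u with
  | [] => []
  | x :: xs =>
    match h : pvConds.find? (fun c => !(PySem.Set.contains seen c) && c.isPrefixOf (x :: xs)) with
    | some c => pvWrap c ++ pvScanB ((x :: xs).drop c.length) (PySem.Set.add seen c)
    | none => x :: pvScanB xs seen
termination_by u.length
decreasing_by
  · have hc : c ∈ pvConds := List.mem_of_find?_eq_some h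
    have := pvConds_length_pos c hc
    simp only [List.length_drop, List.length_cons]
    omega
  · simp

def provide_link_alt (text : String) : String :=
  String.ofList (pvScanB text.toList PySem.Set.empty)

-- ===== PRECONDITION & SPEC =====
-- Pre_ excludes texts in which occurrences of two DISTINCT condition names overlap (e.g.
-- "grappledeafened"): there A wraps the condition that comes first in its fixed list while B wraps
-- the textually first one, and both choices are defensible on this unspecified corner.
def Pre_provide_link (text : String) : Prop :=
  ∀ ci ∈ pvConds, ∀ cj ∈ pvConds, ci ≠ cj →
    ∀ i < text.toList.length, ∀ j < text.toList.length,
      (ci <+: text.toList.drop i ∧ cj <+: text.toList.drop j) →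
      (i + ci.length ≤ j ∨ j + cj.length ≤ i)
instance (text : String) : Decidable (Pre_provide_link text) := by
  unfold Pre_provide_link; infer_instance

def pvWitness_provide_link : String := "a prone orc"

def Spec_provide_link (text : String) (out : String) : Prop := out = provide_link_alt text
instance (text : String) (out : String) : Decidable (Spec_provide_link text out) := by
  unfold Spec_provide_link; infer_instance

-- ===== CLAIM (what is proved, stated in full; the proofs are below) =====
def Claim_equal_provide_link : Prop :=
  ∀ (text : String), Dom_provide_link text → Pre_provide_link text →
    Spec_provide_link text (provide_link text)

-- ===== LEMMAS AND PROOFS =====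

theorem pv_facts : ∀ c ∈ pvConds, c ≠ [] ∧ '[' ∉ c ∧ ']' ∉ c := by decide

theorem pv_nodup : pvConds.Nodup := by decide

-- no condition other than c itself occurs anywhere inside the wrap text of c
theorem pv_wrap_nosub :
    ∀ c ∈ pvConds, ∀ c' ∈ pvConds, c' ≠ c →
      ∀ p < (pvWrap c).length, ¬ c' <+: (pvWrap c).drop p := by decide

theorem pv_wrap_decomp (c : List Char) :
    pvWrap c = (("[[".toList ++ pvUrl ++ "|".toList) ++ c) ++ [']', ']'] := by
  show _ ++ _ ++ _ ++ _ ++ _ = _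
  rw [show "]]".toList = [']',']'] from rfl]

theorem pv_wrap_head (c : List Char) : (pvWrap c)[0]? = some '[' := by
  show (_ ++ _ ++ _ ++ _ ++ _)[0]? = _
  rfl

theorem pv_wrap_last (c : List Char) (h : (pvWrap c).length - 1 < (pvWrap c).length) :
    (pvWrap c)[(pvWrap c).length - 1] = ']' := by
  simp only [pv_wrap_decomp]
  have hlen : ∀ L : List Char, (L ++ [']', ']']).length = L.length + 2 := by simp
  set L := ("[[".toList ++ pvUrl ++ "|".toList) ++ c
  rw [List.getElem_append_right (by rw [hlen]; omega)]
  have h1 : pvUrl.length + (c.length + 2 + 1) - (pvUrl.length + (c.length + 1) + 1) = 1 := by omega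
  simp [h1]

theorem pv_contains_add {s : PySem.Set (List Char)} {c x : List Char} :
    (PySem.Set.add s c).contains x = (s.contains x || x == c) := by
  unfold PySem.Set.add PySem.Set.contains
  split
  · rename_i h
    cases hx : x == c
    · simp
    · have hxc : x = c := by simpa using hx
      subst hxc; simp; simpa using h
  · simp
    cases hx : x == c <;> simp_all

theorem pvFind_some {c u : List Char} {k : Nat} (h : pvFind c u = some k) :
    c <+: u.drop k ∧ k ≤ u.length := by
  induction u generalizing k with
  | nil =>
    unfold pvFind at h
    split at h
    · rename_i hc
      cases h
      exact ⟨by simp [List.isEmpty_iff.mp hc], le_rfl⟩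
    · cases h
  | cons x xs ih =>
    unfold pvFind at h
    split at h
    · rename_i hc
      cases h
      exact ⟨by simpa using List.isPrefixOf_iff_prefix.mp hc, by simp⟩
    · cases hx : pvFind c xs with
      | none => rw [hx] at h; cases h
      | some k' =>
        rw [hx] at h
        cases h
        obtain ⟨hp, hb⟩ := ih hx
        exact ⟨by simpa [List.drop_succ_cons] using hp, by simp; omega⟩

theorem pvFind_of_prefix {c u : List Char} (hc : c ≠ []) (h : c <+: u) : pvFind c u = some 0 := by
  cases u with
  | nil => exact absurd (List.prefix_nil.mp h) hc
  | cons x xs =>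
    unfold pvFind
    rw [if_pos (List.isPrefixOf_iff_prefix.mpr h)]

theorem pvFind_shift {c : List Char} (v u : List Char)
    (hv : ∀ p < v.length, ¬ c <+: (v ++ u).drop p) :
    pvFind c (v ++ u) = (pvFind c u).map (· + v.length) := by
  induction v with
  | nil =>
    rw [List.nil_append]
    cases pvFind c u <;> simp
  | cons a v' ih =>
    have h0 : ¬ c <+: (a :: (v' ++ u)) := by
      have := hv 0 (by simp)
      simpa using this
    rw [List.cons_append]
    conv_lhs => rw [pvFind]
    rw [if_neg (fun hb => h0 (List.isPrefixOf_iff_prefix.mp hb))]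
    have hv' : ∀ p < v'.length, ¬ c <+: (v' ++ u).drop p := by
      intro p hp
      have := hv (p + 1) (by simp; omega)
      simpa [List.cons_append, List.drop_succ_cons] using this
    rw [ih hv']
    cases hu : pvFind c u <;> simp [Nat.add_assoc]

theorem pvStep_append {c₀ : List Char} (_hne : c₀ ≠ []) (v u : List Char)
    (hv : ∀ p < v.length, ¬ c₀ <+: (v ++ u).drop p) :
    pvStep (v ++ u) c₀ = v ++ pvStep u c₀ := by
  unfold pvStep pvReplace1
  rw [pvFind_shift v u hv]
  cases hfind : pvFind c₀ u with
  | none => simp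
  | some k =>
    obtain ⟨hpre, hk⟩ := pvFind_some hfind
    simp only [Option.map_some]
    have ht : (v ++ u).take (k + v.length) = v ++ u.take k := by
      rw [List.take_append, List.take_of_length_le (by omega)]
      congr 2
      omega
    have hd : (v ++ u).drop (k + v.length + c₀.length) = u.drop (k + c₀.length) := by
      rw [List.drop_append, List.drop_eq_nil_iff.mpr (by omega)]
      rw [List.nil_append]
      congr 1
      omega
    rw [ht, hd]
    simp [List.append_assoc]

theorem pvStep_shape (c₀ u : List Char) :
    pvStep u c₀ = u ∨
      ∃ k, k ≤ u.length ∧ (pvStep u c₀).take k = u.take k ∧ (pvStep u c₀)[k]? = some '[' := by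
  cases hfind : pvFind c₀ u with
  | none =>
    left
    unfold pvStep pvReplace1
    rw [hfind]
  | some k =>
    right
    obtain ⟨hpre, hk⟩ := pvFind_some hfind
    have hlen : (u.take k).length = k := by simp; omega
    refine ⟨k, hk, ?_, ?_⟩
    · unfold pvStep pvReplace1
      rw [hfind]
      dsimp only
      rw [List.append_assoc, List.take_append, hlen]
      rw [List.take_of_length_le (by omega)]
      simp
    · unfold pvStep pvReplace1
      rw [hfind]
      dsimp only
      rw [List.append_assoc]
      rw [List.getElem?_append_right (by omega)]
      rw [hlen, Nat.sub_self]
      have hwl : 0 < (pvWrap c₀).length := by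
        rw [pv_wrap_decomp]
        simp
      rw [List.getElem?_append_left hwl]
      exact pv_wrap_head c₀

theorem pv_boundary {c' : List Char} (h1 : '[' ∉ c') (v u u' : List Char)
    (hu' : u' = u ∨ ∃ k, k ≤ u.length ∧ u'.take k = u.take k ∧ u'[k]? = some '[')
    (hold : ∀ p < v.length, ¬ c' <+: (v ++ u).drop p) :
    ∀ p < v.length, ¬ c' <+: (v ++ u').drop p := by
  rcases hu' with rfl | ⟨k, hk, htake, hget⟩
  · exact hold
  intro p hp hpre
  by_cases hle : p + c'.length ≤ v.length + k
  · -- the whole match lies in the region where v ++ u' and v ++ u agree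
    apply hold p hp
    have hagree : (v ++ u').take (v.length + k) = (v ++ u).take (v.length + k) := by
      rw [List.take_append, List.take_append]
      have h3 : v.length + k - v.length = k := by omega
      rw [h3, htake]
    have key : ((v ++ u').drop p).take c'.length = ((v ++ u).drop p).take c'.length := by
      rw [List.take_drop, List.take_drop]
      congr 1
      calc (v ++ u').take (p + c'.length)
          = ((v ++ u').take (v.length + k)).take (p + c'.length) := by
            rw [List.take_take, Nat.min_eq_left hle]
        _ = ((v ++ u).take (v.length + k)).take (p + c'.length) := by rw [hagree]
        _ = (v ++ u).take (p + c'.length) := by rw [List.take_take, Nat.min_eq_left hle]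
    rw [List.prefix_iff_eq_take, ← key]
    exact List.prefix_iff_eq_take.mp hpre
  · -- the match would have to contain the '[' that u' carries at offset k
    have hklt : k < u'.length := by
      by_contra hge
      rw [List.getElem?_eq_none_iff.mpr (by omega)] at hget
      cases hget
    have hm : v.length + k - p < c'.length := by omega
    have hlen2 : c'.length ≤ ((v ++ u').drop p).length := hpre.length_le
    have hget2 : c'[v.length + k - p]'hm = ((v ++ u').drop p)[v.length + k - p]'(by omega) :=
      hpre.getElem hm
    rw [List.getElem_drop] at hget2
    have hidx : p + (v.length + k - p) = v.length + k := by omega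
    have hbr : (v ++ u')[p + (v.length + k - p)]'(by simp; omega) = u'[k]'hklt := by
      simp only [hidx]
      rw [List.getElem_append_right (by omega)]
      congr 1
      omega
    have hbra : u'[k]'hklt = '[' := by
      have := List.getElem?_eq_getElem (l := u') (i := k) hklt
      rw [hget] at this
      exact (Option.some_inj.mp this).symm
    have : '[' ∈ c' := by
      rw [← hbra, ← hbr, ← hget2]
      exact List.getElem_mem hm
    exact h1 this

theorem pv_foldl_append (v : List Char) (R' : List (List Char)) (u : List Char)
    (hmem : ∀ c'' ∈ R', c'' ∈ pvConds)
    (h1 : ∀ c'' ∈ R', ∀ p < v.length, ¬ c'' <+: (v ++ u).drop p) :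
    R'.foldl pvStep (v ++ u) = v ++ R'.foldl pvStep u := by
  induction R' generalizing u with
  | nil => rfl
  | cons c0 R'' ih =>
    have hc0 : c0 ∈ pvConds := hmem c0 (by simp)
    rw [List.foldl_cons, List.foldl_cons]
    rw [pvStep_append (pv_facts c0 hc0).1 v u (h1 c0 (by simp))]
    exact ih (pvStep u c0) (fun c hc => hmem c (by simp [hc]))
      (fun c'' hc'' => pv_boundary (pv_facts c'' (hmem c'' (by simp [hc'']))).2.1 v u
        (pvStep u c0) (pvStep_shape c0 u) (h1 c'' (by simp [hc''])))

theorem pv_foldl_nil (R' : List (List Char)) (hmem : ∀ c ∈ R', c ∈ pvConds) :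
    R'.foldl pvStep [] = [] := by
  induction R' with
  | nil => rfl
  | cons c R ih =>
    have hc : c ≠ [] := (pv_facts c (hmem c (by simp))).1
    have hstep : pvStep [] c = [] := by
      unfold pvStep pvReplace1 pvFind
      rw [if_neg (by simpa using hc)]
    rw [List.foldl_cons, hstep]
    exact ih fun c' h' => hmem c' (by simp [h'])

def pvPreL (u : List Char) : Prop :=
  ∀ ci ∈ pvConds, ∀ cj ∈ pvConds, ci ≠ cj →
    ∀ i j : Nat, ci <+: u.drop i → cj <+: u.drop j → (i + ci.length ≤ j ∨ j + cj.length ≤ i)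

theorem pvPreL_of_pre (text : String) (h : Pre_provide_link text) : pvPreL text.toList := by
  intro ci hci cj hcj hne i j hpi hpj
  have hbound : ∀ c ∈ pvConds, ∀ m : Nat, c <+: text.toList.drop m → m < text.toList.length := by
    intro c hc m hp
    by_contra hm
    rw [List.drop_eq_nil_iff.mpr (by omega)] at hp
    exact (pv_facts c hc).1 (List.prefix_nil.mp hp)
  exact h ci hci cj hcj hne i (hbound ci hci i hpi) j (hbound cj hcj j hpj) ⟨hpi, hpj⟩

theorem pvPreL_drop (u : List Char) (k : Nat) (h : pvPreL u) : pvPreL (u.drop k) := by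
  intro ci hci cj hcj hne i j hpi hpj
  rw [List.drop_drop] at hpi hpj
  have := h ci hci cj hcj hne (k + i) (k + j) hpi hpj
  omega

theorem pvScanB_nil (seen : PySem.Set (List Char)) : pvScanB [] seen = [] := by
  rw [pvScanB]

theorem pvScanB_some {x : Char} {xs : List Char} {seen : PySem.Set (List Char)} {c : List Char}
    (h : pvConds.find? (fun c => !(PySem.Set.contains seen c) && c.isPrefixOf (x :: xs)) = some c) :
    pvScanB (x :: xs) seen = pvWrap c ++ pvScanB ((x :: xs).drop c.length) (PySem.Set.add seen c) := by
  rw [pvScanB]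
  split
  · rename_i c' heq
    rw [h] at heq
    cases heq
    rfl
  · rename_i heq
    rw [h] at heq
    cases heq

theorem pvScanB_none {x : Char} {xs : List Char} {seen : PySem.Set (List Char)}
    (h : pvConds.find? (fun c => !(PySem.Set.contains seen c) && c.isPrefixOf (x :: xs)) = none) :
    pvScanB (x :: xs) seen = x :: pvScanB xs seen := by
  rw [pvScanB]
  split
  · rename_i c' heq
    rw [h] at heq
    cases heq
  · rfl

theorem pv_main : ∀ (n : Nat) (u : List Char) (seen : PySem.Set (List Char)),
    u.length ≤ n → pvPreL u →
    (pvConds.filter (fun c => !(PySem.Set.contains seen c))).foldl pvStep u = pvScanB u seen := by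
  intro n
  induction n with
  | zero =>
    intro u seen hle _
    cases u with
    | nil =>
      rw [pvScanB_nil]
      exact pv_foldl_nil _ (fun c hc => List.mem_of_mem_filter hc)
    | cons x xs => simp at hle
  | succ n ih =>
    intro u seen hle hpre
    cases u with
    | nil =>
      rw [pvScanB_nil]
      exact pv_foldl_nil _ (fun c hc => List.mem_of_mem_filter hc)
    | cons x xs =>
      cases hfind : pvConds.find? (fun c => !(PySem.Set.contains seen c) && c.isPrefixOf (x :: xs)) with
      | none =>
        rw [pvScanB_none hfind]
        have hnm : ∀ c'' ∈ pvConds.filter (fun c => !(PySem.Set.contains seen c)),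
            ∀ p < ([x] : List Char).length, ¬ c'' <+: ([x] ++ xs).drop p := by
          intro c'' hc'' p hp hpre'
          have hp0 : p = 0 := by simpa using hp
          subst hp0
          have hmem := List.mem_of_mem_filter hc''
          have hunseen : (!(PySem.Set.contains seen c'')) = true := (List.mem_filter.mp hc'').2
          apply List.find?_eq_none.mp hfind c'' hmem
          rw [hunseen, Bool.true_and]
          exact List.isPrefixOf_iff_prefix.mpr (by simpa using hpre')
        have heq := pv_foldl_append [x] _ xs (fun c hc => List.mem_of_mem_filter hc) hnm
        rw [show (x :: xs) = [x] ++ xs from rfl, heq, List.singleton_append]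
        congr 1
        exact ih xs seen (by simpa using hle) (by simpa using pvPreL_drop (x :: xs) 1 hpre)
      | some c =>
        rw [pvScanB_some hfind]
        have hcmem : c ∈ pvConds := List.mem_of_find?_eq_some hfind
        have hpred := List.find?_some hfind
        rw [Bool.and_eq_true] at hpred
        have hcunseen : (!(PySem.Set.contains seen c)) = true := hpred.1
        have hcpre : c <+: x :: xs := List.isPrefixOf_iff_prefix.mp hpred.2
        have hcfacts := pv_facts c hcmem
        have hclen : 0 < c.length := List.length_pos_of_ne_nil hcfacts.1
        set R := pvConds.filter (fun c => !(PySem.Set.contains seen c)) with hR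
        have hcR : c ∈ R := List.mem_filter.mpr ⟨hcmem, hcunseen⟩
        obtain ⟨R₁, R₂, hdec⟩ := List.append_of_mem hcR
        have hnodup : R.Nodup := pv_nodup.filter _
        have hnin : c ∉ R₁ ∧ c ∉ R₂ := by
          rw [hdec, List.nodup_append] at hnodup
          obtain ⟨h₁, h₂, hdisj⟩ := hnodup
          exact ⟨fun hc => (hdisj c hc c (by simp)) rfl, (List.nodup_cons.mp h₂).1⟩
        have hrest : x :: xs = c ++ (x :: xs).drop c.length := by
          conv_lhs => rw [← List.take_append_drop c.length (x :: xs)]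
          rw [← List.prefix_iff_eq_take.mp hcpre]
        set rest := (x :: xs).drop c.length with hrestdef
        have hno : ∀ c'' ∈ pvConds, c'' ≠ c → ∀ p < c.length, ¬ c'' <+: (c ++ rest).drop p := by
          intro c'' h'' hne p hp hpre'
          have hc0 : c <+: (x :: xs).drop 0 := by simpa using hcpre
          have hp' : c'' <+: (x :: xs).drop p := by rw [hrest]; exact hpre'
          have hdisj2 := hpre c'' h'' c hcmem hne p 0 hp' hc0
          have hlen'' : 0 < c''.length := List.length_pos_of_ne_nil (pv_facts c'' h'').1
          omega
        have hmemR : ∀ c'' ∈ R, c'' ∈ pvConds := fun c'' hc'' => List.mem_of_mem_filter hc''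
        have hmem₁ : ∀ c'' ∈ R₁, c'' ∈ pvConds := fun c'' hc'' => hmemR c'' (by rw [hdec]; simp [hc''])
        have hmem₂ : ∀ c'' ∈ R₂, c'' ∈ pvConds := fun c'' hc'' => hmemR c'' (by rw [hdec]; simp [hc''])
        rw [hdec, List.foldl_append, List.foldl_cons]
        have hstep1 : R₁.foldl pvStep (x :: xs) = c ++ R₁.foldl pvStep rest := by
          conv_lhs => rw [hrest]
          exact pv_foldl_append c R₁ rest hmem₁
            (fun c'' hc'' => hno c'' (hmem₁ c'' hc'') (fun he => hnin.1 (he ▸ hc'')))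
        rw [hstep1]
        have hstep2 : pvStep (c ++ R₁.foldl pvStep rest) c = pvWrap c ++ R₁.foldl pvStep rest := by
          unfold pvStep pvReplace1
          rw [pvFind_of_prefix hcfacts.1 (List.prefix_append c _)]
          dsimp only
          rw [List.take_zero, List.nil_append, Nat.zero_add, List.drop_left]
        rw [hstep2]
        have hwnm : ∀ c'' ∈ R₂, ∀ p < (pvWrap c).length,
            ¬ c'' <+: (pvWrap c ++ R₁.foldl pvStep rest).drop p := by
          intro c'' hc'' p hp hpre'
          have h''mem := hmem₂ c'' hc''
          have hne : c'' ≠ c := fun he => hnin.2 (he ▸ hc'')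
          have hfacts'' := pv_facts c'' h''mem
          by_cases hsp : p + c''.length ≤ (pvWrap c).length
          · have hdrop : (pvWrap c ++ R₁.foldl pvStep rest).drop p
                = (pvWrap c).drop p ++ R₁.foldl pvStep rest :=
              List.drop_append_of_le_length (le_of_lt hp)
            rw [hdrop] at hpre'
            have hlendrop : c''.length ≤ ((pvWrap c).drop p).length := by
              rw [List.length_drop]; omega
            have hin : c'' <+: (pvWrap c).drop p := by
              rw [List.prefix_iff_eq_take] at hpre' ⊢
              rw [List.take_append_of_le_length hlendrop] at hpre'
              exact hpre'
            exact pv_wrap_nosub c hcmem c'' h''mem hne p hp hin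
          · have hm : (pvWrap c).length - 1 - p < c''.length := by omega
            have hget2 := hpre'.getElem hm
            rw [List.getElem_drop] at hget2
            have hidx : p + ((pvWrap c).length - 1 - p) = (pvWrap c).length - 1 := by omega
            have hlen2 := hpre'.length_le
            rw [List.length_drop] at hlen2
            have hbig : p + ((pvWrap c).length - 1 - p) < (pvWrap c ++ R₁.foldl pvStep rest).length := by
              simp only [List.length_append]
              omega
            have hbr : (pvWrap c ++ R₁.foldl pvStep rest)[p + ((pvWrap c).length - 1 - p)]'hbig = ']' := by
              simp only [hidx]
              rw [List.getElem_append_left (by omega)]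
              exact pv_wrap_last c (by omega)
            have hmem3 : ']' ∈ c'' := by
              rw [← hget2] at hbr
              rw [← hbr]
              exact List.getElem_mem hm
            exact hfacts''.2.2 hmem3
        rw [pv_foldl_append (pvWrap c) R₂ (R₁.foldl pvStep rest) hmem₂ hwnm]
        rw [← List.foldl_append]
        have hfilter : pvConds.filter (fun c' => !(PySem.Set.contains (PySem.Set.add seen c) c'))
            = R₁ ++ R₂ := by
          have hpt : ∀ a ∈ pvConds, (!(PySem.Set.contains (PySem.Set.add seen c) a))
              = ((!(a == c)) && (!(PySem.Set.contains seen a))) := by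
            intro a _
            rw [pv_contains_add]
            cases PySem.Set.contains seen a <;> cases hac : a == c <;> simp
          rw [List.filter_congr hpt, ← List.filter_filter, ← hR, hdec]
          rw [List.filter_append, List.filter_cons]
          have hcc : (!(c == c)) = false := by simp
          rw [hcc]
          simp only [Bool.false_eq_true, if_false]
          rw [List.filter_eq_self.mpr, List.filter_eq_self.mpr]
          · intro a ha
            simp only [Bool.not_eq_true']
            exact beq_eq_false_iff_ne.mpr (fun he => hnin.2 (he ▸ ha))
          · intro a ha
            simp only [Bool.not_eq_true']
            exact beq_eq_false_iff_ne.mpr (fun he => hnin.1 (he ▸ ha))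
        have hlenrest : rest.length ≤ n := by
          rw [hrestdef, List.length_drop]
          simp only [List.length_cons]
          have : xs.length + 1 ≤ n + 1 := by simpa using hle
          omega
        have happ := ih rest (PySem.Set.add seen c) hlenrest (pvPreL_drop (x :: xs) c.length hpre)
        rw [hfilter] at happ
        rw [happ]

-- ===== VERDICT (by name: the statement is the Claim_ definition above) =====
theorem provide_link_spec : Claim_equal_provide_link := by
  intro text _hdom hpre
  unfold Spec_provide_link provide_link provide_link_alt
  have hf : pvConds.filter (fun c => !(PySem.Set.contains PySem.Set.empty c)) = pvConds := by
    apply List.filter_eq_self.mpr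
    intro a _
    simp [PySem.Set.contains, PySem.Set.empty]
  have h := pv_main text.toList.length text.toList PySem.Set.empty le_rfl (pvPreL_of_pre text hpre)
  rw [hf] at h
  rw [h]
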